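-- pv_equiv track=rewrite | github.com/lalate/anicheck-data | txt_to_watch_list.py | compact_schedules
-- ===== SOURCE A (Python) =====
-- from typing import Dict, List, Optional
--
-- def compact_schedules(schedules: List[dict]) -> List[dict]:
--     # station/day_of_week が同一なら、time がある方を優先
--     best: Dict[tuple, dict] = {}
--     for sch in schedules:
--         key = (sch.get("station"), sch.get("day_of_week"))
--         if key not in best:
--             best[key] = sch
--             continue
--         old = best[key]
--         old_score = 1 if old.get("time") else 0
--         new_score = 1 if sch.get("time") else 0
--         if new_score >= old_score:
--             best[key] = sch
--     return list(best.values())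
-- ===== SOURCE B (Python) =====
-- def compact_schedules(schedules):
--     # group by (station, day_of_week) in first-appearance order, then reduce each
--     # group keeping the last entry whose time-score ties or beats the current best
--     groups = {}
--     for sch in schedules:
--         groups.setdefault((sch.get("station"), sch.get("day_of_week")), []).append(sch)
--     result = []
--     for grp in groups.values():
--         best = grp[0]
--         for sch in grp[1:]:
--             if (1 if sch.get("time") else 0) >= (1 if best.get("time") else 0):
--                 best = sch
--         result.append(best)
--     return result
-- ===== Notes on version B (the rewrite author's own statement) =====
-- stated objective: alternative
-- what changed: Replaces A's single running-best dict with a group-then-reduce shape: first pass groups schedules by (station, day_of_week) via setdefault, second pass reduces each group by a last-wins-on-tie scan.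
import Mathlib
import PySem

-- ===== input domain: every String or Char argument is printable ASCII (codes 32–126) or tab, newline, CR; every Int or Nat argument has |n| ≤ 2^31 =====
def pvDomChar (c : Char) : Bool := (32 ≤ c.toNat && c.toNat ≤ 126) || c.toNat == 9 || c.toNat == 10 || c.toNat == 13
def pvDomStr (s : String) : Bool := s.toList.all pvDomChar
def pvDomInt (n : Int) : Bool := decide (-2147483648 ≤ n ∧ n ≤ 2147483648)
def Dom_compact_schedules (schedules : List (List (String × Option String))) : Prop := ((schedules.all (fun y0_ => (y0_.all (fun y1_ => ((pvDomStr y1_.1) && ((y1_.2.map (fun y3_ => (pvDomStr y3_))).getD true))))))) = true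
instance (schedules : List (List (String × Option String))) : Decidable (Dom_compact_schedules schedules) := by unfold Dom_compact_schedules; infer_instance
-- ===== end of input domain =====

-- B replaces A's single running-best pass with a group-by-key pass followed by a
-- per-group last-wins-on-tie reduction (alternative decomposition, same cost).


-- shared helpers (Python dict-of-a-schedule semantics, used by both ports)
-- sch.get(k): first match in the association list; a stored None and a missing
-- key both read back as Python None, hence the .join flattening.
def pvGetFlat (sch : List (String × Option String)) (k : String) : Option String :=
  ((sch.find? (fun p => p.1 == k)).map (fun p => p.2)).join

-- Python truthiness of sch.get("time"): None and "" are falsy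
def pvTruthy : Option String → Bool
  | some s => !s.toList.isEmpty
  | none => false

-- 1 if sch.get("time") else 0
def pvScore (sch : List (String × Option String)) : Int :=
  if pvTruthy (pvGetFlat sch "time") then 1 else 0

-- key = (sch.get("station"), sch.get("day_of_week"))
def pvKey (sch : List (String × Option String)) : Option String × Option String :=
  (pvGetFlat sch "station", pvGetFlat sch "day_of_week")

-- ===== PORT A =====
-- loop body of A: insert when the key is new, else replace on new_score >= old_score
def pvStepA (best : PySem.Dict (Option String × Option String) (List (String × Option String)))
    (sch : List (String × Option String)) :
    PySem.Dict (Option String × Option String) (List (String × Option String)) :=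
  let key := pvKey sch
  if best.contains key = false then best.insert key sch
  else
    -- best[key]: the key is present here, so the [] default is never read
    let old := (best.get? key).getD []
    if pvScore sch ≥ pvScore old then best.insert key sch else best

def compact_schedules (schedules : List (List (String × Option String))) : List (List (String × Option String)) :=
  (schedules.foldl pvStepA PySem.Dict.empty).values

-- ===== PORT B =====
-- loop body of B's first pass: groups.setdefault(key, []).append(sch)
def pvStepB (g : PySem.Dict (Option String × Option String) (List (List (String × Option String))))
    (sch : List (String × Option String)) :
    PySem.Dict (Option String × Option String) (List (List (String × Option String))) :=
  g.modify (pvKey sch) [] (fun l => l ++ [sch])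

-- B's second pass over one group: best = grp[0]; replace when score >= current
def pvPick (grp : List (List (String × Option String))) : List (String × Option String) :=
  match grp with
  | [] => []
  | h :: t => t.foldl (fun cur sch => if pvScore sch ≥ pvScore cur then sch else cur) h

def compact_schedules_alt (schedules : List (List (String × Option String))) : List (List (String × Option String)) :=
  ((schedules.foldl pvStepB PySem.Dict.empty).values).map pvPick

-- ===== PRECONDITION & SPEC =====
def Spec_compact_schedules (schedules : List (List (String × Option String))) (out : List (List (String × Option String))) : Prop := out = compact_schedules_alt schedules
instance (schedules : List (List (String × Option String))) (out : List (List (String × Option String))) : Decidable (Spec_compact_schedules schedules out) := by unfold Spec_compact_schedules; infer_instance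

-- ===== CLAIM (what is proved, stated in full; the proofs are below) =====
def Claim_equal_compact_schedules : Prop := ∀ (schedules : List (List (String × Option String))), Dom_compact_schedules schedules → Spec_compact_schedules schedules (compact_schedules schedules)

-- ===== LEMMAS AND PROOFS =====

lemma pvPick_append (h : List (String × Option String)) (t : List (List (String × Option String)))
    (sch : List (String × Option String)) :
    pvPick ((h :: t) ++ [sch]) =
      if pvScore sch ≥ pvScore (pvPick (h :: t)) then sch else pvPick (h :: t) := by
  simp [pvPick, List.foldl_append]

lemma pv_main (l : List (List (String × Option String)))
    (g : PySem.Dict (Option String × Option String) (List (List (String × Option String))))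
    (a : PySem.Dict (Option String × Option String) (List (String × Option String)))
    (hnd : g.keys.Nodup)
    (hne : ∀ p ∈ g.items, p.2 ≠ [])
    (hrel : a.items = g.items.map (fun p => (p.1, pvPick p.2))) :
    (l.foldl pvStepA a).items = (l.foldl pvStepB g).items.map (fun p => (p.1, pvPick p.2)) := by
  induction l generalizing g a with
  | nil => simpa using hrel
  | cons sch l ih =>
    have hkeys : a.keys = g.keys := by
      simp only [PySem.Dict.keys, hrel, List.map_map]
      rfl
    have hca : a.contains (pvKey sch) = g.contains (pvKey sch) := by
      simp [PySem.Dict.contains_eq_decide_mem_keys, hkeys]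
    have hand : a.keys.Nodup := hkeys ▸ hnd
    simp only [List.foldl_cons]
    by_cases hc : g.contains (pvKey sch) = true
    · -- existing key
      obtain ⟨grp, hget⟩ : ∃ grp, g.get? (pvKey sch) = some grp := by
        have := PySem.Dict.contains_eq_isSome_get? (d := g) (k := pvKey sch)
        rw [hc] at this
        exact Option.isSome_iff_exists.mp this.symm
      have hmem : (pvKey sch, grp) ∈ g.items := PySem.Dict.mem_items_of_get?_eq_some _ hget
      have hgrne : grp ≠ [] := hne _ hmem
      have hgetD : g.getD (pvKey sch) [] = grp := PySem.Dict.getD_of_get?_eq_some _ _ hget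
      have hagot : a.get? (pvKey sch) = some (pvPick grp) := by
        refine PySem.Dict.get?_of_mem_items a ?_ hand
        rw [hrel]
        exact List.mem_map_of_mem hmem
      have hstepB : pvStepB g sch = g.insert (pvKey sch) (grp ++ [sch]) := by
        show g.insert (pvKey sch) (g.getD (pvKey sch) [] ++ [sch]) = _
        rw [hgetD]
      have hpick : pvPick (grp ++ [sch]) =
          if pvScore sch ≥ pvScore (pvPick grp) then sch else pvPick grp := by
        obtain ⟨h, t, rfl⟩ := List.exists_cons_of_ne_nil hgrne
        exact pvPick_append h t sch
      have hstepA : pvStepA a sch =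
          if pvScore sch ≥ pvScore (pvPick grp) then a.insert (pvKey sch) sch else a := by
        simp [pvStepA, hca, hc, hagot]
      -- items of the B step
      have hBitems : (pvStepB g sch).items =
          g.items.map (fun p => if p.1 == pvKey sch then (pvKey sch, grp ++ [sch]) else p) := by
        rw [hstepB, PySem.Dict.items_insert_of_contains _ _ hc]
      have hkeyeq : ∀ p ∈ g.items, p.1 = pvKey sch → p = (pvKey sch, grp) := by
        intro p hp hpk
        have : g.get? p.1 = some p.2 := PySem.Dict.get?_of_mem_items _ hp hnd
        rw [hpk, hget] at this
        obtain ⟨p1, p2⟩ := p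
        simp_all
      have hrec := ih (pvStepB g sch) (pvStepA a sch)
        (by rw [hstepB]; exact PySem.Dict.nodup_keys_insert _ _ _ hnd)
        (by
          intro p hp
          rw [hBitems] at hp
          obtain ⟨q, hq, hqe⟩ := List.mem_map.mp hp
          by_cases hk : (q.1 == pvKey sch) = true
          · rw [if_pos hk] at hqe
            subst hqe; simp
          · rw [if_neg hk] at hqe
            exact hqe ▸ hne q hq)
        (by
          rw [hstepA, hBitems, List.map_map]
          by_cases hs : pvScore sch ≥ pvScore (pvPick grp)
          · rw [if_pos hs, PySem.Dict.items_insert_of_contains _ _ (hca.trans hc), hrel, List.map_map]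
            apply List.map_congr_left
            intro p hp
            by_cases hk : p.1 = pvKey sch
            · simp [Function.comp, hk, hpick, hs]
            · simp [Function.comp, hk]
          · rw [if_neg hs, hrel]
            apply List.map_congr_left
            intro p hp
            by_cases hk : p.1 = pvKey sch
            · have := hkeyeq p hp hk
              subst this
              simp [Function.comp, hpick, hs]
            · simp [Function.comp, hk])
      exact hrec
    · -- fresh key
      have hc' : g.contains (pvKey sch) = false := by
        cases hgc : g.contains (pvKey sch) <;> simp_all
      have hca' : a.contains (pvKey sch) = false := hca.trans hc'
      have hstepB : pvStepB g sch = g.insert (pvKey sch) [sch] := by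
        show g.insert (pvKey sch) (g.getD (pvKey sch) [] ++ [sch]) = _
        rw [PySem.Dict.getD_of_not_contains _ _ hc']
        simp
      have hstepA : pvStepA a sch = a.insert (pvKey sch) sch := by
        simp [pvStepA, hca']
      have hrec := ih (pvStepB g sch) (pvStepA a sch)
        (by rw [hstepB]; exact PySem.Dict.nodup_keys_insert _ _ _ hnd)
        (by
          intro p hp
          rw [hstepB, PySem.Dict.items_insert_of_not_contains _ _ hc'] at hp
          rcases List.mem_append.mp hp with h1 | h2
          · exact hne p h1
          · simp only [List.mem_singleton] at h2
            subst h2; simp)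
        (by
          rw [hstepA, hstepB,
            PySem.Dict.items_insert_of_not_contains _ _ hca',
            PySem.Dict.items_insert_of_not_contains _ _ hc',
            List.map_append, hrel]
          simp [pvPick])
      exact hrec

-- ===== VERDICT (by name: the statement is the Claim_ definition above) =====
theorem compact_schedules_spec : Claim_equal_compact_schedules := by
  intro schedules _
  show compact_schedules schedules = compact_schedules_alt schedules
  unfold compact_schedules compact_schedules_alt
  have h := pv_main schedules PySem.Dict.empty PySem.Dict.empty
    (by simp [PySem.Dict.keys, PySem.Dict.empty])
    (by simp [PySem.Dict.empty])
    (by simp [PySem.Dict.empty])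
  simp only [PySem.Dict.values, h, List.map_map]
  rfl
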